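-- pv_equiv track=rewrite | github.com/RxiPland/Phonebook-OSINT-desktop | main.py | vymazat_mezery
-- ===== SOURCE A (Python) =====
-- def vymazat_mezery(obsah_raw):
--
--     # funkce pro uložení jak zkrášlený json
--     # preventivně vymaže všechny mezery (kromě mezer v uvozovkách)
--
--     final = ""
--     uvozovky_lock = False   # false == mimo uvozovky;  true == v uvozovkách
--
--     for znak in obsah_raw:
--         if znak in ["\"", "\'"]:
--
--             if uvozovky_lock:
--
--                 uvozovky_lock = False
--             else:
--                 uvozovky_lock = True
--
--             final += znak
--
--         elif znak in [" ", "\n", "\t"] and not uvozovky_lock: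
--             pass
--
--         else:
--             final += znak
--
--     return final
-- ===== SOURCE B (Python) =====
-- def _split_quotes(s):
--     # split s at quote characters: list of (text, quote) pairs plus trailing text
--     pairs = []
--     cur = ""
--     for ch in s:
--         if ch in "\"'":
--             pairs.append((cur, ch))
--             cur = ""
--         else:
--             cur += ch
--     return pairs, cur
--
-- def _strip(text):
--     # remove exactly space, newline and tab
--     return "".join(ch for ch in text if ch not in " \n\t")
--
-- def vymazat_mezery(obsah_raw):
--     pairs, tail = _split_quotes(obsah_raw)
--     out = []
--     inside = False
--     for text, q in pairs:
--         out.append(text if inside else _strip(text))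
--         out.append(q)
--         inside = not inside
--     out.append(tail if inside else _strip(tail))
--     return "".join(out)
-- ===== Notes on version B (the rewrite author's own statement) =====
-- stated objective: alternative
-- what changed: Replaces A's char-by-char state machine (lock flag, per-char append) by a segment decomposition: split the string at quote characters into (text, quote) pairs, then per whole segment either keep it verbatim (inside quotes) or filter out the three whitespace chars (outside), toggling once per quote.
import Mathlib
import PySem

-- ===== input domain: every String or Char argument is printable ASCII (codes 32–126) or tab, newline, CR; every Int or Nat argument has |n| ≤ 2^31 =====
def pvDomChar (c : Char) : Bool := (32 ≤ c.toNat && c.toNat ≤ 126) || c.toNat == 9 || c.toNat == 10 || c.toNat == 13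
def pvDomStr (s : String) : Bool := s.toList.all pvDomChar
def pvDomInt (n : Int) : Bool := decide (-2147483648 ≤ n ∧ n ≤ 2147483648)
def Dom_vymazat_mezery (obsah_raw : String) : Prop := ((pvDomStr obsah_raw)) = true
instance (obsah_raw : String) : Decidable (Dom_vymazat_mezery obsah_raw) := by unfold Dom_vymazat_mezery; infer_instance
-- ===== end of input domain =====

-- B replaces A's char-by-char lock state machine by a segment decomposition (split at
-- quotes, per-segment filter of the three whitespace chars outside quotes); objective: alternative.

-- ===== PORT A =====
-- A's loop: state (final, uvozovky_lock); per char: quote toggles lock and is appended;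
-- " ", "\n", "\t" outside quotes are dropped; everything else is appended.
def vymazat_mezery (obsah_raw : String) : String :=
  String.ofList
    ((obsah_raw.toList.foldl
      (fun (st : List Char × Bool) znak =>
        if znak = '"' ∨ znak = '\'' then
          (st.1 ++ [znak], !st.2)
        else if (znak = ' ' ∨ znak = '\n' ∨ znak = '\t') ∧ st.2 = false then
          st
        else
          (st.1 ++ [znak], st.2))
      ([], false)).1)

-- ===== PORT B =====
-- _split_quotes: list of (text, quote) pairs plus trailing text
def pvSplitQuotes (cur : List Char) : List Char → List (List Char × Char) × List Char
  | [] => ([], cur)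
  | ch :: rest =>
    if ch = '"' ∨ ch = '\'' then
      let r := pvSplitQuotes [] rest
      ((cur, ch) :: r.1, r.2)
    else
      pvSplitQuotes (cur ++ [ch]) rest

-- _strip: remove exactly space, newline and tab
def pvStrip (text : List Char) : List Char :=
  text.filter (fun ch => !(ch = ' ' ∨ ch = '\n' ∨ ch = '\t'))

-- the loop over pairs: state (out, inside); text kept verbatim inside, stripped outside;
-- quote char appended; inside toggled
def vymazat_mezery_alt (obsah_raw : String) : String :=
  String.ofList
    ((((pvSplitQuotes [] obsah_raw.toList).1.foldl
        (fun (st : List Char × Bool) p =>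
          (st.1 ++ (if st.2 then p.1 else pvStrip p.1) ++ [p.2], !st.2))
        ([], false)).1) ++
      (if ((pvSplitQuotes [] obsah_raw.toList).1.foldl
        (fun (st : List Char × Bool) p =>
          (st.1 ++ (if st.2 then p.1 else pvStrip p.1) ++ [p.2], !st.2))
        ([], false)).2
       then (pvSplitQuotes [] obsah_raw.toList).2
       else pvStrip (pvSplitQuotes [] obsah_raw.toList).2))

-- ===== PRECONDITION & SPEC =====
def Spec_vymazat_mezery (obsah_raw : String) (out : String) : Prop := out = vymazat_mezery_alt obsah_raw
instance (obsah_raw : String) (out : String) : Decidable (Spec_vymazat_mezery obsah_raw out) := by unfold Spec_vymazat_mezery; infer_instance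

-- ===== CLAIM (what is proved, stated in full; the proofs are below) =====
def Claim_equal_vymazat_mezery : Prop := ∀ (obsah_raw : String), Dom_vymazat_mezery obsah_raw → Spec_vymazat_mezery obsah_raw (vymazat_mezery obsah_raw)

-- ===== LEMMAS AND PROOFS =====

-- common reference: result of the whole traversal starting with lock b
def pvRef (b : Bool) : List Char → List Char
  | [] => []
  | c :: cs =>
    if c = '"' ∨ c = '\'' then c :: pvRef (!b) cs
    else if (c = ' ' ∨ c = '\n' ∨ c = '\t') ∧ b = false then pvRef b cs
    else c :: pvRef b cs

lemma vymazat_foldl_eq (l : List Char) : ∀ (acc : List Char) (b : Bool),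
    (l.foldl
      (fun (st : List Char × Bool) znak =>
        if znak = '"' ∨ znak = '\'' then
          (st.1 ++ [znak], !st.2)
        else if (znak = ' ' ∨ znak = '\n' ∨ znak = '\t') ∧ st.2 = false then
          st
        else
          (st.1 ++ [znak], st.2))
      (acc, b)).1 = acc ++ pvRef b l := by
  induction l with
  | nil => intro acc b; simp [pvRef]
  | cons c cs ih =>
    intro acc b
    by_cases hq : c = '"' ∨ c = '\''
    · simp [List.foldl_cons, hq, pvRef, ih]
    · by_cases hw : (c = ' ' ∨ c = '\n' ∨ c = '\t') ∧ b = false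
      · simp [List.foldl_cons, hq, hw, pvRef, ih]
      · simp [List.foldl_cons, hq, hw, pvRef, ih]

lemma alt_eq_ref (l : List Char) : ∀ (cur acc : List Char) (b : Bool),
    (((pvSplitQuotes cur l).1.foldl
        (fun (st : List Char × Bool) p =>
          (st.1 ++ (if st.2 then p.1 else pvStrip p.1) ++ [p.2], !st.2))
        (acc, b)).1) ++
      (if ((pvSplitQuotes cur l).1.foldl
        (fun (st : List Char × Bool) p =>
          (st.1 ++ (if st.2 then p.1 else pvStrip p.1) ++ [p.2], !st.2))
        (acc, b)).2
       then (pvSplitQuotes cur l).2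
       else pvStrip (pvSplitQuotes cur l).2)
    = acc ++ (if b then cur else pvStrip cur) ++ pvRef b l := by
  induction l with
  | nil => intro cur acc b; simp [pvSplitQuotes, pvRef]
  | cons c cs ih =>
    intro cur acc b
    by_cases hq : c = '"' ∨ c = '\''
    · simp only [pvSplitQuotes, if_pos hq, List.foldl_cons]
      rw [ih]
      cases b <;> simp [pvRef, hq, pvStrip]
    · simp only [pvSplitQuotes, if_neg hq]
      rw [ih]
      cases b
      · by_cases hw1 : c = ' ' ∨ c = '\n' ∨ c = '\t'
        · rcases hw1 with h | h | h <;> subst h <;> simp [pvRef, pvStrip]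
        · have h := not_or.mp hw1
          have h2 := not_or.mp h.2
          simp [pvRef, hq, pvStrip, h.1, h2.1, h2.2]
      · simp [pvRef, hq]

-- ===== VERDICT (by name: the statement is the Claim_ definition above) =====
theorem vymazat_mezery_spec : Claim_equal_vymazat_mezery := by
  intro s _
  unfold Spec_vymazat_mezery vymazat_mezery vymazat_mezery_alt
  rw [vymazat_foldl_eq, alt_eq_ref]
  simp [pvStrip]
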